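-- pv_equiv track=rewrite | github.com/M-JULIANI/nyc-monitor | backend/rag/root_agent.py | _extract_investigation_context
-- ===== SOURCE A (Python) =====
-- from typing import Dict, Any, Optional
--
-- def _extract_investigation_context(prompt: str, context: Dict[str, Any] = None) -> Dict[str, Any]:
--     """
--     Extract investigation context from prompt and ADK context.
--     This helps maintain state across the investigation.
--     """
--     investigation_context = {}
--
--     # Extract from ADK context if available
--     if context:
--         investigation_context.update(context)
--
--     # Try to extract investigation ID from prompt
--     if "Investigation ID:" in prompt:
--         try:
--             lines = prompt.split('\n')
--             for line in lines:
--                 if "Investigation ID:" in line: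
--                     investigation_id = line.split(
--                         "Investigation ID:")[-1].strip()
--                     investigation_context["investigation_id"] = investigation_id
--                     break
--         except Exception:
--             pass
--
--     # Extract alert information from prompt
--     for field in ["Alert ID:", "Event Type:", "Location:", "Severity:"]:
--         if field in prompt:
--             try:
--                 lines = prompt.split('\n')
--                 for line in lines:
--                     if field in line:
--                         value = line.split(field)[-1].strip()
--                         key = field.lower().replace(":", "").replace(" ", "_")
--                         investigation_context[key] = value
--                         break
--             except Exception:
--                 pass
--
--     return investigation_context
-- ===== SOURCE B (Python) =====
-- def _grab(cur, field, line):
--     """Accumulator step: capture the value the first time field appears."""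
--     if cur is None and field in line:
--         return line.split(field)[-1].strip()
--     return cur
--
--
-- def _extract_investigation_context(prompt: str, context=None):
--     """One streaming pass over the lines: each field's first value is captured
--     into its own accumulator as lines go by; the result dict is assembled once
--     at the end, in fixed field order, over the context seed."""
--     inv = aid = ev = loc = sev = None
--     for line in prompt.split('\n'):
--         inv = _grab(inv, "Investigation ID:", line)
--         aid = _grab(aid, "Alert ID:", line)
--         ev = _grab(ev, "Event Type:", line)
--         loc = _grab(loc, "Location:", line)
--         sev = _grab(sev, "Severity:", line)
--     result = dict(context) if context else {}
--     for key, val in [("investigation_id", inv), ("alert_id", aid),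
--                      ("event_type", ev), ("location", loc), ("severity", sev)]:
--         if val is not None:
--             result[key] = val
--     return result
-- ===== Notes on version B (the rewrite author's own statement) =====
-- stated objective: alternative
-- what changed: A splits the prompt and scans the lines once per field (five staged passes, each breaking at the first match); B makes one streaming pass over the lines maintaining five per-field accumulators that capture each field's first value, then assembles the dict at the end in fixed field order.
import Mathlib
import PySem

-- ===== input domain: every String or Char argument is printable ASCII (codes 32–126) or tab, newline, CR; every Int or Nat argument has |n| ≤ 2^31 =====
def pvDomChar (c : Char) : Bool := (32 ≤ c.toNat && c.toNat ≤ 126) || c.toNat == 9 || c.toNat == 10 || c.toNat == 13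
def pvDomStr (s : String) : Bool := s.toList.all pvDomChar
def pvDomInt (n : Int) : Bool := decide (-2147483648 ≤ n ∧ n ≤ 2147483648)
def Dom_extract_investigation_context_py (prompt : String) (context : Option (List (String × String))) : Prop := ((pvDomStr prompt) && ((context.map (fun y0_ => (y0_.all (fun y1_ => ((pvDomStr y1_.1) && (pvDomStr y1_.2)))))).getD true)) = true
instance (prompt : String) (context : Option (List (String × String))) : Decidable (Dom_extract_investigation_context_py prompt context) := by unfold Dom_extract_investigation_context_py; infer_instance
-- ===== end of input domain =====

-- B replaces A's five per-field passes over the lines with ONE streaming pass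
-- that fills five per-field first-value accumulators, assembling the dict at the end
-- (alternative decomposition; return-value equivalence).


-- ===== PORT A =====
-- prompt.split('\n'); the separator is non-empty so split? is always some (exact)
def pvLines (s : String) : List String := (PySem.Str.split? s "\n").getD []

-- line.split(field)[-1].strip(); field is a non-empty literal, so split returns a
-- non-empty list and [-1] never raises (exact)
def pvVal (l field : String) : String :=
  PySem.Str.strip (PySem.List.pyGetD ((PySem.Str.split? l field).getD []) (-1) "")

-- A's inner 'for line in lines: if field in line: … ; break'
def pvScanA (field key : String) (lines : List String) (d : PySem.Dict String String) : PySem.Dict String String :=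
  match lines with
  | [] => d
  | l :: rest => if PySem.Str.isIn field l then d.insert key (pvVal l field) else pvScanA field key rest d

def extract_investigation_context_py (prompt : String) (context : Option (List (String × String))) : List (String × String) :=
  -- investigation_context = {}; if context: investigation_context.update(context)
  let d1 : PySem.Dict String String :=
    match context with
    | some c => if c ≠ [] then PySem.Dict.empty.update c else PySem.Dict.empty
    | none => PySem.Dict.empty
  -- the Investigation ID block
  let d2 := if PySem.Str.isIn "Investigation ID:" prompt then
      pvScanA "Investigation ID:" "investigation_id" (pvLines prompt) d1
    else d1
  -- for field in [...]: if field in prompt: re-split and scan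
  let d3 := ["Alert ID:", "Event Type:", "Location:", "Severity:"].foldl
    (fun d field =>
      if PySem.Str.isIn field prompt then
        pvScanA field (PySem.Str.replace (PySem.Str.replace (PySem.Str.lower field) ":" "") " " "_") (pvLines prompt) d
      else d) d2
  d3.items

-- ===== PORT B =====
-- _grab: capture the value the first time field appears
def pvGrab (cur : Option String) (field line : String) : Option String :=
  if cur.isNone && PySem.Str.isIn field line then some (pvVal line field) else cur

-- the five accumulators (inv, aid, ev, loc, sev), updated line by line
def pvStepB (s : Option String × Option String × Option String × Option String × Option String)
    (line : String) : Option String × Option String × Option String × Option String × Option String :=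
  (pvGrab s.1 "Investigation ID:" line,
   pvGrab s.2.1 "Alert ID:" line,
   pvGrab s.2.2.1 "Event Type:" line,
   pvGrab s.2.2.2.1 "Location:" line,
   pvGrab s.2.2.2.2 "Severity:" line)

def extract_investigation_context_py_alt (prompt : String) (context : Option (List (String × String))) : List (String × String) :=
  -- single pass over the lines
  let s := (pvLines prompt).foldl pvStepB (none, none, none, none, none)
  -- result = dict(context) if context else {}
  let d0 : PySem.Dict String String :=
    match context with
    | some c => if c ≠ [] then PySem.Dict.ofList c else PySem.Dict.empty
    | none => PySem.Dict.empty
  -- assemble in fixed field order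
  let d := [("investigation_id", s.1), ("alert_id", s.2.1), ("event_type", s.2.2.1),
            ("location", s.2.2.2.1), ("severity", s.2.2.2.2)].foldl
    (fun d kv => match kv.2 with | some v => d.insert kv.1 v | none => d) d0
  d.items

-- ===== PRECONDITION & SPEC =====
def Spec_extract_investigation_context_py (prompt : String) (context : Option (List (String × String))) (out : List (String × String)) : Prop := out = extract_investigation_context_py_alt prompt context
instance (prompt : String) (context : Option (List (String × String))) (out : List (String × String)) : Decidable (Spec_extract_investigation_context_py prompt context out) := by unfold Spec_extract_investigation_context_py; infer_instance

-- ===== CLAIM (what is proved, stated in full; the proofs are below) =====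
def Claim_equal_extract_investigation_context_py : Prop := ∀ (prompt : String) (context : Option (List (String × String))), Dom_extract_investigation_context_py prompt context → Spec_extract_investigation_context_py prompt context (extract_investigation_context_py prompt context)

-- ===== LEMMAS AND PROOFS =====

-- every piece produced by splitOn.go is an infix of cs, given the stated invariants
theorem pv_go_infix (sep : List Char) (cs : List Char) :
    ∀ (fuel : Nat) (l cur : List Char) (acc : List (List Char)),
      (∀ p ∈ acc, p <:+: cs) →
      (∀ pre, pre <+: l → cur.reverse ++ pre <:+: cs) →
      ∀ p ∈ PySem.Chars.splitOn.go sep fuel l cur acc, p <:+: cs := by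
  intro fuel
  induction fuel with
  | zero =>
    intro l cur acc hacc hcur p hp
    simp [PySem.Chars.splitOn.go] at hp
    rcases hp with h | h
    · exact hacc p h
    · exact h ▸ hcur l List.prefix_rfl
  | succ n ih =>
    intro l cur acc hacc hcur p hp
    match l with
    | [] =>
      simp [PySem.Chars.splitOn.go] at hp
      rcases hp with h | h
      · exact hacc p h
      · exact h ▸ (by simpa using hcur [] List.nil_prefix)
    | c :: rest =>
      rw [PySem.Chars.splitOn.go] at hp
      split at hp
      · refine ih _ [] _ ?_ ?_ p hp
        · intro q hq
          rcases List.mem_cons.mp hq with h | h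
          · exact h ▸ (by simpa using hcur [] List.nil_prefix)
          · exact hacc q h
        · intro pre hpre
          have h1 : cur.reverse ++ (c :: rest) <:+: cs := hcur _ List.prefix_rfl
          have h2 : pre <:+: c :: rest :=
            hpre.isInfix.trans (List.drop_suffix _ _).isInfix
          simpa using h2.trans ((List.suffix_append _ _).isInfix.trans h1)
      · refine ih _ _ _ hacc ?_ p hp
        intro pre hpre
        have := hcur (c :: pre) (by simpa using hpre)
        simpa using this

theorem pv_mem_splitOn_infix {cs sep p : List Char} (hp : p ∈ PySem.Chars.splitOn cs sep) : p <:+: cs := by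
  refine pv_go_infix sep cs _ cs [] [] (by simp) ?_ p hp
  intro pre hpre
  simpa using hpre.isInfix

-- a member of prompt.split('\n') is an infix of prompt
theorem pv_mem_pvLines_infix {prompt l : String} (hl : l ∈ pvLines prompt) :
    l.toList <:+: prompt.toList := by
  have h := PySem.Str.split?_map prompt "\n"
  cases hs : PySem.Str.split? prompt "\n" with
  | none =>
    rw [hs] at h
    simp [PySem.Chars.split?] at h
  | some xs =>
    rw [hs] at h
    simp [PySem.Chars.split?] at h
    have hx : l ∈ xs := by simpa [pvLines, hs] using hl
    have : l.toList ∈ PySem.Chars.splitOn prompt.toList ['\n'] := by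
      rw [← h]; exact List.mem_map_of_mem hx
    exact pv_mem_splitOn_infix this

-- if some line of the prompt contains field, the prompt contains field
theorem pv_isIn_of_line {prompt field l : String} (hl : l ∈ pvLines prompt)
    (h : PySem.Str.isIn field l = true) : PySem.Str.isIn field prompt = true := by
  rw [PySem.Str.isIn_iff_infix] at h ⊢
  exact h.trans (pv_mem_pvLines_infix hl)

-- A's scan loop is a first-match search
theorem pvScanA_eq_find (field key : String) (lines : List String) (d : PySem.Dict String String) :
    pvScanA field key lines d =
      match lines.find? (fun l => PySem.Str.isIn field l) with
      | some l => d.insert key (pvVal l field)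
      | none => d := by
  induction lines with
  | nil => simp [pvScanA]
  | cons l rest ih =>
    by_cases h : PySem.Str.isIn field l
    · have hc : PySem.Chars.isIn field.toList l.toList = true := by simpa using h
      simp [pvScanA, List.find?, hc]
    · have hc : PySem.Chars.isIn field.toList l.toList = false := by
        simpa using (Bool.not_eq_true _).mp h
      simp [pvScanA, List.find?, hc, ih]

-- A's guarded per-field pass equals a first-match insert
theorem pv_field_step (prompt field key : String) (d : PySem.Dict String String) :
    (if PySem.Str.isIn field prompt then pvScanA field key (pvLines prompt) d else d) =
      match (pvLines prompt).find? (fun l => PySem.Str.isIn field l) with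
      | some l => d.insert key (pvVal l field)
      | none => d := by
  by_cases hg : PySem.Str.isIn field prompt
  · rw [if_pos hg, pvScanA_eq_find]
  · rw [if_neg hg]
    have hnone : (pvLines prompt).find? (fun l => PySem.Str.isIn field l) = none := by
      cases hf : (pvLines prompt).find? (fun l => PySem.Str.isIn field l) with
      | none => rfl
      | some l =>
        exact absurd (pv_isIn_of_line (List.mem_of_find?_eq_some hf) (List.find?_some hf)) hg
    rw [hnone]

-- one accumulator, folded alone over the lines
def pvFold1 (field : String) (lines : List String) (c : Option String) : Option String :=
  lines.foldl (fun c l => pvGrab c field l) c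

-- a filled accumulator is frozen
theorem pvFold1_some (field : String) (lines : List String) (v : String) :
    pvFold1 field lines (some v) = some v := by
  induction lines with
  | nil => rfl
  | cons l rest ih => simpa [pvFold1, pvGrab] using ih

-- B's single pass acts on each accumulator independently
theorem pvStepB_fold (lines : List String)
    (s : Option String × Option String × Option String × Option String × Option String) :
    lines.foldl pvStepB s =
      (pvFold1 "Investigation ID:" lines s.1,
       pvFold1 "Alert ID:" lines s.2.1,
       pvFold1 "Event Type:" lines s.2.2.1,
       pvFold1 "Location:" lines s.2.2.2.1,
       pvFold1 "Severity:" lines s.2.2.2.2) := by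
  induction lines generalizing s with
  | nil => rfl
  | cons l rest ih => simpa [pvFold1, List.foldl, pvStepB] using ih (pvStepB s l)

-- from an empty accumulator, the streaming pass computes the first match's value
theorem pvFold1_none (field : String) (lines : List String) :
    pvFold1 field lines none =
      (lines.find? (fun l => PySem.Str.isIn field l)).map (fun l => pvVal l field) := by
  induction lines with
  | nil => rfl
  | cons l rest ih =>
    by_cases h : PySem.Str.isIn field l
    · have hc : PySem.Chars.isIn field.toList l.toList = true := by simpa using h
      have h1 : pvFold1 field (l :: rest) none = pvFold1 field rest (pvGrab none field l) := rfl
      rw [h1]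
      simp [pvGrab, pvFold1_some, List.find?, hc]
    · have hc : PySem.Chars.isIn field.toList l.toList = false := by
        simpa using (Bool.not_eq_true _).mp h
      simpa [pvFold1, List.foldl, pvGrab, h, List.find?, hc] using ih

-- B's assembly step per field equals the first-match insert
theorem pv_assemble_step (prompt field key : String) (d : PySem.Dict String String) :
    (match ((pvLines prompt).find? (fun l => PySem.Str.isIn field l)).map
        (fun l => pvVal l field) with
      | some v => d.insert key v
      | none => d) =
      match (pvLines prompt).find? (fun l => PySem.Str.isIn field l) with
      | some l => d.insert key (pvVal l field)
      | none => d := by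
  cases (pvLines prompt).find? (fun l => PySem.Str.isIn field l) <;> rfl

-- ===== VERDICT (by name: the statement is the Claim_ definition above) =====
theorem extract_investigation_context_py_spec : Claim_equal_extract_investigation_context_py := by
  intro prompt context _
  unfold Spec_extract_investigation_context_py
  unfold extract_investigation_context_py extract_investigation_context_py_alt
  simp only [List.foldl, pvStepB_fold, pvFold1_none]
  rw [pv_field_step prompt "Investigation ID:" "investigation_id",
      pv_field_step prompt "Alert ID:", pv_field_step prompt "Event Type:",
      pv_field_step prompt "Location:", pv_field_step prompt "Severity:",
      pv_assemble_step, pv_assemble_step, pv_assemble_step, pv_assemble_step, pv_assemble_step]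
  have k1 : PySem.Str.replace (PySem.Str.replace (PySem.Str.lower "Alert ID:") ":" "") " " "_" = "alert_id" := by decide
  have k2 : PySem.Str.replace (PySem.Str.replace (PySem.Str.lower "Event Type:") ":" "") " " "_" = "event_type" := by decide
  have k3 : PySem.Str.replace (PySem.Str.replace (PySem.Str.lower "Location:") ":" "") " " "_" = "location" := by decide
  have k4 : PySem.Str.replace (PySem.Str.replace (PySem.Str.lower "Severity:") ":" "") " " "_" = "severity" := by decide
  rw [k1, k2, k3, k4]
  rfl
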